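-- pv_equiv track=rewrite | github.com/maxiballerini/teoria-de-la-info | TP-3/main.py | convertir_cadena
-- ===== SOURCE A (Python) =====
-- def convertir_cadena(cadena_bits):
--     bytes_lista = []
--     longitud_original = len(cadena_bits)
--
--     # Agrupa los bits en bytes
--     for i in range(0, longitud_original, 8):
--         sublista_bits = cadena_bits[i:i+8]  # Obtiene un grupo de 8 bits
--         while len(sublista_bits) < 8:
--             # Si el último grupo tiene menos de 8 bits, completa con ceros a la derecha
--             sublista_bits.append(0)
--
--         # Convierte la lista de bits a un entero
--         byte_val = 0
--         for bit in sublista_bits: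
--             byte_val = (byte_val << 1) | bit
--
--         bytes_lista.append(byte_val)  # Añade el byte a la lista
--     return bytes_lista
-- ===== SOURCE B (Python) =====
-- def convertir_cadena(cadena_bits):
--     # Single streaming pass: accumulate bits into byte_val, emit every 8 bits;
--     # a trailing partial byte is left-shifted to pad with zeros on the right.
--     bytes_lista = []
--     byte_val = 0
--     count = 0
--     for bit in cadena_bits:
--         byte_val = (byte_val << 1) | bit
--         count += 1
--         if count == 8:
--             bytes_lista.append(byte_val)
--             byte_val = 0
--             count = 0
--     if count > 0:
--         bytes_lista.append(byte_val << (8 - count))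
--     return bytes_lista
-- ===== Notes on version B (the rewrite author's own statement) =====
-- stated objective: alternative
-- what changed: Replaces A's slice-into-8-bit-chunks-then-pad-then-inner-fold decomposition with a single streaming pass that keeps a (byte accumulator, bit counter) state, emitting a byte each 8th bit and left-shifting the trailing partial byte to reproduce right-zero padding.
import Mathlib
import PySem

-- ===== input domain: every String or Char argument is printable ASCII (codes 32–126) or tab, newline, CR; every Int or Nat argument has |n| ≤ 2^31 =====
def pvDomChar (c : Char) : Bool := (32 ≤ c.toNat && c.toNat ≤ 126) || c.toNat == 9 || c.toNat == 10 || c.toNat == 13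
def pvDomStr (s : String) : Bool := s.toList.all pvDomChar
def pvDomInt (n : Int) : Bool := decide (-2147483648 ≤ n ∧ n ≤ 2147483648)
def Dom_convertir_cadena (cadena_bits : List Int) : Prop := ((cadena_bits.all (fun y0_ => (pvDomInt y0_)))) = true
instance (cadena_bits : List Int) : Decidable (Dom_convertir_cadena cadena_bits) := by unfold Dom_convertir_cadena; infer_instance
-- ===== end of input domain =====

-- B replaces A's slice-into-8-bit-chunks decomposition by a single streaming pass
-- with a (byte accumulator, bit counter) state (objective: alternative; same cost).


-- ===== PORT A =====
-- 'while len(sublista_bits) < 8: sublista_bits.append(0)' — literal while-loop recursion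
def pvPad8 (l : List Int) : List Int :=
  if l.length < 8 then pvPad8 (l ++ [0]) else l
  termination_by 8 - l.length
  decreasing_by simp_all; omega

def convertir_cadena (cadena_bits : List Int) : List Int :=
  let longitud_original : Int := cadena_bits.length
  (PySem.List.pyRange 0 longitud_original 8).foldl
    (fun bytes_lista i =>
      let sublista_bits := PySem.List.slice cadena_bits (some i) (some (i + 8))
      let sublista_bits := pvPad8 sublista_bits
      let byte_val := sublista_bits.foldl (fun v bit => PySem.Int.bor (v <<< (1 : Nat)) bit) 0
      bytes_lista ++ [byte_val]) []

-- ===== PORT B =====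
def pvStepB (st : List Int × Int × Int) (bit : Int) : List Int × Int × Int :=
  let bl := st.1
  let bv := PySem.Int.bor (st.2.1 <<< (1 : Nat)) bit
  let c := st.2.2 + 1
  if c = 8 then (bl ++ [bv], 0, 0) else (bl, bv, c)

def convertir_cadena_alt (cadena_bits : List Int) : List Int :=
  let s := cadena_bits.foldl pvStepB ([], 0, 0)
  if s.2.2 > 0 then s.1 ++ [s.2.1 <<< (8 - s.2.2).toNat] else s.1

-- ===== PRECONDITION & SPEC =====
def Spec_convertir_cadena (cadena_bits : List Int) (out : List Int) : Prop := out = convertir_cadena_alt cadena_bits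
instance (cadena_bits : List Int) (out : List Int) : Decidable (Spec_convertir_cadena cadena_bits out) := by unfold Spec_convertir_cadena; infer_instance

-- ===== CLAIM (what is proved, stated in full; the proofs are below) =====
def Claim_equal_convertir_cadena : Prop := ∀ (cadena_bits : List Int), Dom_convertir_cadena cadena_bits → Spec_convertir_cadena cadena_bits (convertir_cadena cadena_bits)

-- ===== LEMMAS AND PROOFS =====

-- common chunk-level description of the result
def pvByte (l : List Int) : Int :=
  l.foldl (fun v bit => PySem.Int.bor (v <<< (1 : Nat)) bit) 0

def pvChunks (xs : List Int) : List Int :=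
  if xs = [] then []
  else pvByte (pvPad8 (xs.take 8)) :: pvChunks (xs.drop 8)
  termination_by xs.length
  decreasing_by
    rename_i h
    have : 0 < xs.length := List.length_pos_iff.mpr h
    simp [List.length_drop]; omega

theorem pvPad8_eq (l : List Int) : pvPad8 l = l ++ List.replicate (8 - l.length) 0 := by
  fun_induction pvPad8 l with
  | case1 l h ih =>
      rw [ih]
      have : 8 - l.length = (8 - (l.length + 1)) + 1 := by omega
      simp [this, List.replicate_succ]
  | case2 l h =>
      have : 8 - l.length = 0 := by omega
      simp [this]

theorem pvBor_zero (a : Int) : PySem.Int.bor a 0 = a := by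
  cases a with
  | ofNat n => simp
  | negSucc n => simp [PySem.Int.bor]; omega

-- fold of bitStep over zeros is a left shift
theorem pvFold_zeros (k : Nat) (v : Int) :
    (List.replicate k (0 : Int)).foldl (fun v bit => PySem.Int.bor (v <<< (1 : Nat)) bit) v
      = v <<< k := by
  induction k generalizing v with
  | zero => simp
  | succ k ih =>
      rw [List.replicate_succ, List.foldl_cons, ih, pvBor_zero]
      rw [Int.shiftLeft_eq, Int.shiftLeft_eq, Int.shiftLeft_eq]
      ring

-- chunk count driven variant of pvChunks, for the A side
def pvChunksAux : Nat → List Int → List Int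
  | 0, _ => []
  | m + 1, xs => pvByte (pvPad8 (xs.take 8)) :: pvChunksAux m (xs.drop 8)

theorem pvChunks_nil : pvChunks ([] : List Int) = [] := by
  rw [pvChunks]; simp

theorem pvChunks_ne (xs : List Int) (hx : xs ≠ []) :
    pvChunks xs = pvByte (pvPad8 (xs.take 8)) :: pvChunks (xs.drop 8) := by
  rw [pvChunks]; simp [hx]

theorem pvFoldRange_eq_chunksAux (m : Nat) (xs bl : List Int) :
    (List.range m).foldl (fun bl k => bl ++ [pvByte (pvPad8 ((xs.drop (8*k)).take 8))]) bl
      = bl ++ pvChunksAux m xs := by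
  induction m generalizing xs bl with
  | zero => simp [pvChunksAux]
  | succ m ih =>
      rw [List.range_succ_eq_map, List.foldl_cons, List.foldl_map]
      have hfun : (fun (bl : List Int) (k : Nat) =>
            bl ++ [pvByte (pvPad8 ((xs.drop (8*(k+1))).take 8))])
          = (fun bl k => bl ++ [pvByte (pvPad8 (((xs.drop 8).drop (8*k)).take 8))]) := by
        funext bl k
        rw [List.drop_drop]
        ring_nf
      simp only [Nat.succ_eq_add_one] at *
      rw [hfun, ih (xs.drop 8)]
      simp [pvChunksAux]

theorem pvChunksAux_ceil (xs : List Int) :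
    pvChunksAux (((xs.length : Int) + 7) / 8).toNat xs = pvChunks xs := by
  generalize hn : xs.length = n
  induction n using Nat.strong_induction_on generalizing xs with
  | _ n ih =>
      by_cases hx : xs = []
      · subst hx; simp at hn; subst hn
        have h0 : (((0 : Int) + 7) / 8).toNat = 0 := by norm_num
        simp only [Nat.cast_zero, h0, pvChunks_nil, pvChunksAux]
      · have hpos : 0 < n := by subst hn; exact List.length_pos_iff.mpr hx
        have hdrop : (xs.drop 8).length = n - 8 := by simp [hn]
        have hk : (((n : Int) + 7) / 8).toNat = ((((n - 8 : Nat) : Int) + 7) / 8).toNat + 1 := by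
          by_cases h8 : 8 ≤ n
          · have : ((n - 8 : Nat) : Int) = (n : Int) - 8 := by omega
            rw [this]; omega
          · have : ((n - 8 : Nat) : Int) = 0 := by omega
            rw [this]; omega
        rw [hk, pvChunks_ne xs hx, pvChunksAux]
        exact congrArg _ (ih (n - 8) (by omega) (xs.drop 8) hdrop)

-- B side: 8 - c more bits keep accumulating without emitting
theorem pvFoldB_partial (l : List Int) (bl : List Int) (bv : Int) (c : Int)
    (hc : 0 ≤ c) (hlen : c + l.length < 8) :
    l.foldl pvStepB (bl, bv, c)
      = (bl, l.foldl (fun v bit => PySem.Int.bor (v <<< (1 : Nat)) bit) bv, c + l.length) := by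
  induction l generalizing bv c with
  | nil => simp
  | cons b t ih =>
      simp only [List.foldl_cons, List.length_cons] at *
      rw [pvStepB]
      have h8 : ¬ (c + 1 = 8) := by omega
      simp only [h8, if_false]
      rw [ih _ (c+1) (by omega) (by omega)]
      simp only [Prod.mk.injEq]
      refine ⟨trivial, trivial, ?_⟩
      push_cast; ring

-- B side: exactly filling the byte emits it and resets the state
theorem pvFoldB_full (l : List Int) (bl : List Int) (bv : Int) (c : Int)
    (hc : 0 ≤ c) (hlen : c + l.length = 8) (hne : l ≠ []) :
    l.foldl pvStepB (bl, bv, c)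
      = (bl ++ [l.foldl (fun v bit => PySem.Int.bor (v <<< (1 : Nat)) bit) bv], 0, 0) := by
  induction l generalizing bv c with
  | nil => exact absurd rfl hne
  | cons b t ih =>
      simp only [List.foldl_cons, List.length_cons] at *
      by_cases ht : t = []
      · subst ht
        simp only [List.length_nil] at hlen ⊢
        have h8 : c + 1 = 8 := by omega
        rw [pvStepB]; simp [h8]
      · rw [pvStepB]
        have h8 : ¬ (c + 1 = 8) := by
          have : 0 < t.length := List.length_pos_iff.mpr ht
          omega
        simp only [h8, if_false]
        exact ih _ (c+1) (by omega) (by omega) ht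

theorem pvBrun_eq_chunks (xs : List Int) (bl : List Int) :
    (let s := xs.foldl pvStepB (bl, 0, 0)
     if s.2.2 > 0 then s.1 ++ [s.2.1 <<< (8 - s.2.2).toNat] else s.1)
      = bl ++ pvChunks xs := by
  generalize hn : xs.length = n
  induction n using Nat.strong_induction_on generalizing xs bl with
  | _ n ih =>
      by_cases hx : xs = []
      · subst hx; simp at hn; subst hn; simp [pvChunks_nil]
      · have hpos : 0 < n := by subst hn; exact List.length_pos_iff.mpr hx
        show (let s := xs.foldl pvStepB (bl, 0, 0)
          if s.2.2 > 0 then s.1 ++ [s.2.1 <<< (8 - s.2.2).toNat] else s.1) = bl ++ pvChunks xs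
        rw [show xs.foldl pvStepB (bl, 0, 0)
              = (xs.take 8 ++ xs.drop 8).foldl pvStepB (bl, 0, 0) by
            rw [List.take_append_drop], List.foldl_append]
        by_cases h8 : 8 ≤ n
        · have htl : (xs.take 8).length = 8 := by simp [hn]; omega
          have htne : xs.take 8 ≠ [] := by
            intro h; rw [h] at htl; simp at htl
          rw [pvFoldB_full _ bl 0 0 le_rfl (by rw [htl]; norm_num) htne]
          have hdl : (xs.drop 8).length = n - 8 := by simp [hn]
          have := ih (n - 8) (by omega) (xs.drop 8)
            (bl ++ [(xs.take 8).foldl (fun v bit => PySem.Int.bor (v <<< (1 : Nat)) bit) 0]) hdl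
          rw [this, pvChunks_ne xs hx]
          have hpad : pvPad8 (xs.take 8) = xs.take 8 := by
            rw [pvPad8_eq, htl]; simp
          rw [hpad, pvByte, List.append_assoc]
          simp
        · have htake : xs.take 8 = xs := List.take_of_length_le (by omega)
          have hdrop : xs.drop 8 = [] := List.drop_of_length_le (by omega)
          rw [htake, hdrop, List.foldl_nil]
          rw [pvFoldB_partial _ bl 0 0 le_rfl (by omega)]
          have hcpos : ((0 : Int) + (xs.length : Int)) > 0 := by
            rw [hn]; omega
          rw [if_pos hcpos, pvChunks_ne xs hx, htake, hdrop, pvChunks_nil]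
          rw [pvByte, pvPad8_eq, List.foldl_append, pvFold_zeros]
          have h1 : ((8 : Int) - (0 + (xs.length : Int))).toNat = 8 - xs.length := by omega
          rw [h1]

-- ===== VERDICT (by name: the statement is the Claim_ definition above) =====
theorem convertir_cadena_spec : Claim_equal_convertir_cadena := by
  intro xs _
  show convertir_cadena xs = convertir_cadena_alt xs
  simp only [convertir_cadena, convertir_cadena_alt]
  rw [PySem.List.pyRange_of_pos 0 ((xs.length : Int)) (by norm_num)]
  rw [List.foldl_map]
  have hfun : (fun (bytes_lista : List Int) (k : Nat) =>
        bytes_lista ++ [(pvPad8 (PySem.List.slice xs (some (0 + 8 * (k : Int)))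
          (some (0 + 8 * (k : Int) + 8)))).foldl
          (fun v bit => PySem.Int.bor (v <<< (1 : Nat)) bit) 0])
      = (fun bl k => bl ++ [pvByte (pvPad8 ((xs.drop (8*k)).take 8))]) := by
    funext bl k
    have h1 : (0 : Int) + 8 * (k : Int) = ((8 * k : Nat) : Int) := by push_cast; ring
    have h2 : (0 : Int) + 8 * (k : Int) + 8 = ((8 * k : Nat) : Int) + ((8 : Nat) : Int) := by
      push_cast; ring
    rw [h2, h1, PySem.List.slice_natCast_add, pvByte]
  rw [hfun, pvFoldRange_eq_chunksAux]
  have hm : (if (0 : Int) < (xs.length : Int)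
        then (((xs.length : Int) - 0 + 8 - 1) / 8).toNat else 0)
      = (((xs.length : Int) + 7) / 8).toNat := by
    split_ifs with h
    · omega
    · omega
  rw [hm, pvChunksAux_ceil, pvBrun_eq_chunks xs []]
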